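-- pv_equiv track=rewrite | github.com/esblair8/advent-of-code | 2023/6/solution.py | calculate
-- ===== SOURCE A (Python) =====
-- def calculate(time, distance):
--     distances = []
--     for i in range(0, time + 1):
--         time_left = time - i
--         distance_travelled = time_left * i
--         if distance_travelled > distance:
--             distances.append(distance_travelled)
--     return distances
-- ===== SOURCE B (Python) =====
-- def calculate(time, distance):
--     # Distance travelled i*(time-i) is unimodal on 0..time and symmetric about
--     # time/2: binary-search the first winning hold time lo on [0, time//2];
--     # the winners are then exactly lo..time-lo.
--     if time < 0:
--         return []
--     m = time // 2
--     if m * (time - m) <= distance: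
--         return []
--     lo, hi = 0, m
--     while lo < hi:
--         mid = lo + (hi - lo) // 2
--         if mid * (time - mid) > distance:
--             hi = mid
--         else:
--             lo = mid + 1
--     return [i * (time - i) for i in range(lo, time - lo + 1)]
-- ===== Notes on version B (the rewrite author's own statement) =====
-- stated objective: alternative
-- what changed: Replaces the linear scan testing every hold time 0..time with a binary search for the first winning hold time on [0, time//2] (using unimodality and symmetry of i*(time-i)), then emits only the qualifying interval lo..time-lo; the search is O(log time) but building the output list still costs its length.
import Mathlib
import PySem

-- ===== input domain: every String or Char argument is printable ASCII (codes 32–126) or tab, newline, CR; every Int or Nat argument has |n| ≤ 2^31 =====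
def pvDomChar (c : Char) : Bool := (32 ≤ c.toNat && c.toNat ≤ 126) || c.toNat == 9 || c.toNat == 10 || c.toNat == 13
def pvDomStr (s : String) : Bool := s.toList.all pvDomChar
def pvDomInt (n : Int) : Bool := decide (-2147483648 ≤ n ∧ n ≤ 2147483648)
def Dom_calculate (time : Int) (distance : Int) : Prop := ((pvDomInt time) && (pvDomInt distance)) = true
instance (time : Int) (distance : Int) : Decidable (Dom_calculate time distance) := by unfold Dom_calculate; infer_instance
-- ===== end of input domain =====

-- B replaces A's linear scan over all hold times by a binary search for the first
-- winning hold time and emits only the qualifying interval (objective: alternative).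

-- ===== PORT A =====
def calculate (time : Int) (distance : Int) : List Int :=
  (PySem.List.pyRange 0 (time + 1) 1).foldl (fun distances i =>
    let time_left := time - i
    let distance_travelled := time_left * i
    if distance_travelled > distance then distances ++ [distance_travelled]
    else distances) []

-- ===== PORT B =====
-- midpoint bounds, cited by bsearchCalc's termination proof
theorem bsearchMid_bounds (lo hi : Int) (h : lo < hi) :
    lo ≤ lo + PySem.Int.floordiv (hi - lo) 2 ∧ lo + PySem.Int.floordiv (hi - lo) 2 < hi := by
  rw [PySem.Int.floordiv_eq_ediv_of_pos (by omega)]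
  omega

-- the while-loop of Source B: first i in [lo, hi] with i*(time-i) > distance
def bsearchCalc (time : Int) (distance : Int) (lo : Int) (hi : Int) : Int :=
  if h : lo < hi then
    let mid := lo + PySem.Int.floordiv (hi - lo) 2
    if mid * (time - mid) > distance then bsearchCalc time distance lo mid
    else bsearchCalc time distance (mid + 1) hi
  else lo
termination_by (hi - lo).toNat
decreasing_by
  · have := bsearchMid_bounds lo hi h; omega
  · have := bsearchMid_bounds lo hi h; omega

def calculate_alt (time : Int) (distance : Int) : List Int :=
  if time < 0 then []
  else
    let m := PySem.Int.floordiv time 2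
    if m * (time - m) ≤ distance then []
    else
      let lo := bsearchCalc time distance 0 m
      (PySem.List.pyRange lo (time - lo + 1) 1).map (fun i => i * (time - i))

-- ===== PRECONDITION & SPEC =====
def Spec_calculate (time : Int) (distance : Int) (out : List Int) : Prop := out = calculate_alt time distance
instance (time : Int) (distance : Int) (out : List Int) : Decidable (Spec_calculate time distance out) := by unfold Spec_calculate; infer_instance

-- ===== CLAIM (what is proved, stated in full; the proofs are below) =====
def Claim_equal_calculate : Prop := ∀ (time : Int) (distance : Int), Dom_calculate time distance → Spec_calculate time distance (calculate time distance)

-- ===== LEMMAS AND PROOFS =====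

-- monotonicity of the travelled distance i*(t-i) below the vertex
theorem g_mono (t i j : Int) (_h0 : 0 ≤ i) (hij : i ≤ j) (hsum : i + j ≤ t) :
    i * (t - i) ≤ j * (t - j) := by
  nlinarith [mul_nonneg (sub_nonneg.2 hij) (by linarith : (0:Int) ≤ t - i - j)]

-- step equations for bsearchCalc
theorem bsearchCalc_eq_left (time distance lo hi : Int) (h : lo < hi)
    (hP : (lo + PySem.Int.floordiv (hi - lo) 2) * (time - (lo + PySem.Int.floordiv (hi - lo) 2)) > distance) :
    bsearchCalc time distance lo hi =
      bsearchCalc time distance lo (lo + PySem.Int.floordiv (hi - lo) 2) := by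
  rw [bsearchCalc, dif_pos h]; exact if_pos hP

theorem bsearchCalc_eq_right (time distance lo hi : Int) (h : lo < hi)
    (hP : ¬ (lo + PySem.Int.floordiv (hi - lo) 2) * (time - (lo + PySem.Int.floordiv (hi - lo) 2)) > distance) :
    bsearchCalc time distance lo hi =
      bsearchCalc time distance (lo + PySem.Int.floordiv (hi - lo) 2 + 1) hi := by
  rw [bsearchCalc, dif_pos h]; exact if_neg hP

theorem bsearchCalc_spec (time distance lo hi : Int) :
    0 ≤ lo → lo ≤ hi → 2 * hi ≤ time → distance < hi * (time - hi) →
    (∀ i, 0 ≤ i → i < lo → ¬ distance < i * (time - i)) →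
    0 ≤ bsearchCalc time distance lo hi ∧ bsearchCalc time distance lo hi ≤ hi ∧
    distance < bsearchCalc time distance lo hi * (time - bsearchCalc time distance lo hi) ∧
    ∀ i, 0 ≤ i → i < bsearchCalc time distance lo hi → ¬ distance < i * (time - i) := by
  induction lo, hi using bsearchCalc.induct time distance with
  | case1 lo hi h mid hP ih =>
    intro h0 hlh hht hPhi hinv
    have hb := bsearchMid_bounds lo hi h
    have hmid : mid = lo + PySem.Int.floordiv (hi - lo) 2 := rfl
    rw [← hmid] at hb
    have hP' : (lo + PySem.Int.floordiv (hi - lo) 2) * (time - (lo + PySem.Int.floordiv (hi - lo) 2)) > distance := hP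
    rw [bsearchCalc_eq_left time distance lo hi h hP', ← hmid]
    have hres := ih h0 (by omega) (by omega) hP hinv
    exact ⟨hres.1, by omega, hres.2.2⟩
  | case2 lo hi h mid hP ih =>
    intro h0 hlh hht hPhi hinv
    have hb := bsearchMid_bounds lo hi h
    have hmid : mid = lo + PySem.Int.floordiv (hi - lo) 2 := rfl
    rw [← hmid] at hb
    have hP' : ¬ (lo + PySem.Int.floordiv (hi - lo) 2) * (time - (lo + PySem.Int.floordiv (hi - lo) 2)) > distance := hP
    rw [bsearchCalc_eq_right time distance lo hi h hP', ← hmid]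
    refine ih (by omega) (by omega) hht hPhi ?_
    intro i hi0 hilt hPi
    have hle : i * (time - i) ≤ mid * (time - mid) :=
      g_mono time i mid hi0 (by omega) (by omega)
    have hnP : mid * (time - mid) ≤ distance := not_lt.1 hP
    linarith
  | case3 lo hi h =>
    intro h0 hlh hht hPhi hinv
    rw [bsearchCalc, dif_neg h]
    have heq : lo = hi := by omega
    subst heq
    exact ⟨h0, le_refl _, hPhi, hinv⟩

-- A's loop is the filtered map over the range
theorem calculate_eq_filter (time distance : Int) :
    calculate time distance =
      ((PySem.List.pyRange 0 (time + 1) 1).filter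
        (fun i => decide (distance < (time - i) * i))).map (fun i => (time - i) * i) := by
  unfold calculate
  rw [PySem.List.foldl_append_ite (p := fun i => distance < (time - i) * i)
    (f := fun i => (time - i) * i)]
  simp

theorem calculate_spec_aux (time distance : Int) :
    calculate time distance = calculate_alt time distance := by
  rw [calculate_eq_filter]
  unfold calculate_alt
  by_cases ht : time < 0
  · rw [if_pos ht, PySem.List.pyRange_one_eq_nil (by omega)]
    simp
  · rw [if_neg ht]
    have ht0 : 0 ≤ time := by omega
    set m := PySem.Int.floordiv time 2 with hm
    have hm' : 2 * m ≤ time ∧ time ≤ 2 * m + 1 ∧ 0 ≤ m := by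
      rw [hm, PySem.Int.floordiv_eq_ediv_of_pos (by omega)]; omega
    -- the vertex value m*(time-m) is the maximum over [0, time]
    have hmax : ∀ i, 0 ≤ i → i ≤ time → i * (time - i) ≤ m * (time - m) := by
      intro i h0 hle
      by_cases hc : i ≤ m
      · exact g_mono time i m h0 hc (by omega)
      · have hsym : i * (time - i) = (time - i) * (time - (time - i)) := by ring
        rw [hsym]
        exact g_mono time (time - i) m (by omega) (by omega) (by omega)
    by_cases hd : m * (time - m) ≤ distance
    · rw [if_pos hd]
      rw [List.filter_eq_nil_iff.2, List.map_nil]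
      intro i hi
      rw [PySem.List.mem_pyRange_one] at hi
      simp only [decide_eq_true_eq, not_lt]
      calc (time - i) * i = i * (time - i) := by ring
        _ ≤ m * (time - m) := hmax i hi.1 (by omega)
        _ ≤ distance := hd
    · rw [if_neg hd]
      rw [not_le] at hd
      obtain ⟨hlo0, hlom, hPlo, hinv⟩ :=
        bsearchCalc_spec time distance 0 m (le_refl 0) hm'.2.2 hm'.1 hd
          (fun i h0 hlt => absurd h0 (by omega))
      set lo := bsearchCalc time distance 0 m with hlodef
      -- characterisation: on [0, time], the race wins iff lo ≤ i ≤ time - lo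
      have hchar : ∀ i, 0 ≤ i → i ≤ time →
          (distance < (time - i) * i ↔ lo ≤ i ∧ i ≤ time - lo) := by
        intro i h0 hit
        constructor
        · intro hPi
          constructor
          · by_contra hc
            exact hinv i h0 (by omega) (by rw [mul_comm] at hPi; exact hPi)
          · by_contra hc
            have hni : ¬ distance < (time - i) * (time - (time - i)) :=
              hinv (time - i) (by omega) (by omega)
            rw [show time - (time - i) = i by ring] at hni
            exact hni hPi
        · intro hli
          have hmono : lo * (time - lo) ≤ i * (time - i) :=
            g_mono time lo i hlo0 hli.1 (by omega)
          rw [mul_comm]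
          linarith
      -- split the range [0, time+1) at lo and time-lo+1
      have hsplit : PySem.List.pyRange 0 (time + 1) 1 =
          PySem.List.pyRange 0 lo 1 ++ PySem.List.pyRange lo (time - lo + 1) 1 ++
          PySem.List.pyRange (time - lo + 1) (time + 1) 1 := by
        rw [PySem.List.pyRange_one_append 0 lo (time + 1) hlo0 (by omega),
          PySem.List.pyRange_one_append lo (time - lo + 1) (time + 1) (by omega) (by omega),
          List.append_assoc]
      rw [hsplit, List.filter_append, List.filter_append]
      rw [List.filter_eq_nil_iff.2 (by
        intro i hi
        rw [PySem.List.mem_pyRange_one] at hi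
        simp only [decide_eq_true_eq, not_lt]
        exact not_lt.1 ((hchar i hi.1 (by omega)).not.2 (by omega)))]
      rw [List.filter_eq_self.2 (by
        intro i hi
        rw [PySem.List.mem_pyRange_one] at hi
        simp only [decide_eq_true_eq]
        exact (hchar i (by omega) (by omega)).2 ⟨hi.1, by omega⟩)]
      rw [List.filter_eq_nil_iff.2 (by
        intro i hi
        rw [PySem.List.mem_pyRange_one] at hi
        simp only [decide_eq_true_eq, not_lt]
        exact not_lt.1 ((hchar i (by omega) (by omega)).not.2 (by omega)))]
      rw [List.nil_append, List.append_nil]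
      exact List.map_congr_left (fun i _ => by ring)

-- ===== VERDICT (by name: the statement is the Claim_ definition above) =====
theorem calculate_spec : Claim_equal_calculate := by
  intro time distance _
  unfold Spec_calculate
  exact calculate_spec_aux time distance
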